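-- pv_equiv track=rewrite | github.com/ramyadtcc86/kafka | kare-msk-agent/services/remediation_service.py | _compute_valid_scale_target
-- ===== SOURCE A (Python) =====
-- def _compute_valid_scale_target(broker_count, az_count):
--     if az_count <= 0:
--         return broker_count + 3
--     for multiplier in range(1, 20):
--         candidate = az_count * multiplier
--         if candidate > broker_count and candidate <= broker_count * 2:
--             return candidate
--     return None
-- ===== SOURCE B (Python) =====
-- def _compute_valid_scale_target(broker_count, az_count):
--     if az_count <= 0:
--         return broker_count + 3
--     m = broker_count // az_count + 1
--     if m < 1:
--         m = 1
--     candidate = az_count * m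
--     if m <= 19 and broker_count < candidate <= broker_count * 2:
--         return candidate
--     return None
-- ===== Notes on version B (the rewrite author's own statement) =====
-- stated objective: simpler
-- what changed: Replaces the bounded linear scan over multipliers 1..19 with a closed-form ceiling-division computation of the unique candidate multiplier, clamped to 1 and checked against the same bounds.
import Mathlib
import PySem

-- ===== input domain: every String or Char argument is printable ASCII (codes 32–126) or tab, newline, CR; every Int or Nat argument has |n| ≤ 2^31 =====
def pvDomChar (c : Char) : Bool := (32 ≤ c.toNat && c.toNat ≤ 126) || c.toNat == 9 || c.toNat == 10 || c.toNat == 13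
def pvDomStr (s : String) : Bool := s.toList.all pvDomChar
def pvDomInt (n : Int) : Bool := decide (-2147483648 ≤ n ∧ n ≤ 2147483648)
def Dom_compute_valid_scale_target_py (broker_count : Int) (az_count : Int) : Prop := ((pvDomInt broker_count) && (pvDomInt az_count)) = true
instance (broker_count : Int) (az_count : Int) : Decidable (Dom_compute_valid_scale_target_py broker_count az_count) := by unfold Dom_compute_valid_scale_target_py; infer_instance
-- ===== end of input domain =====

-- B replaces A's scan over multipliers 1..19 with a closed-form floor-division candidate multiplier; same return value everywhere (objective: simpler).

-- ===== PORT A =====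
-- the 'for multiplier in range(1, 20)' loop with early return, as recursion over the range list
def computeLoopA (broker_count : Int) (az_count : Int) : List Int → Option Int
  | [] => none
  | m :: rest =>
      if az_count * m > broker_count ∧ az_count * m ≤ broker_count * 2 then some (az_count * m)
      else computeLoopA broker_count az_count rest

def compute_valid_scale_target_py (broker_count : Int) (az_count : Int) : Option Int :=
  if az_count ≤ 0 then some (broker_count + 3)
  else computeLoopA broker_count az_count (PySem.List.pyRange 1 20 1)

-- ===== PORT B =====
def compute_valid_scale_target_py_alt (broker_count : Int) (az_count : Int) : Option Int :=
  if az_count ≤ 0 then some (broker_count + 3)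
  else
    let m0 := PySem.Int.floordiv broker_count az_count + 1
    let m := if m0 < 1 then 1 else m0
    if m ≤ 19 ∧ broker_count < az_count * m ∧ az_count * m ≤ broker_count * 2 then some (az_count * m)
    else none

-- ===== PRECONDITION & SPEC =====
def Spec_compute_valid_scale_target_py (broker_count : Int) (az_count : Int) (out : Option Int) : Prop := out = compute_valid_scale_target_py_alt broker_count az_count
instance (broker_count : Int) (az_count : Int) (out : Option Int) : Decidable (Spec_compute_valid_scale_target_py broker_count az_count out) := by unfold Spec_compute_valid_scale_target_py; infer_instance

-- ===== CLAIM (what is proved, stated in full; the proofs are below) =====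
def Claim_equal_compute_valid_scale_target_py : Prop := ∀ (broker_count : Int) (az_count : Int), Dom_compute_valid_scale_target_py broker_count az_count → Spec_compute_valid_scale_target_py broker_count az_count (compute_valid_scale_target_py broker_count az_count)

-- ===== LEMMAS AND PROOFS =====
theorem computeLoopA_none (b az : Int) :
    ∀ l : List Int, (∀ m ∈ l, ¬(az * m > b ∧ az * m ≤ b * 2)) → computeLoopA b az l = none := by
  intro l h
  induction l with
  | nil => rfl
  | cons m rest ih =>
    simp only [computeLoopA]
    rw [if_neg (h m (by simp))]
    exact ih (fun x hx => h x (by simp [hx]))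

-- the loop over [i, …, 19] returns the closed-form candidate az*M (or none) whenever
-- M is the least multiplier exceeding broker_count and i has not passed M yet
theorem computeLoopA_run (b az M : Int) (haz : 0 < az)
    (hM : ∀ m : Int, 1 ≤ m → (az * m > b ↔ M ≤ m)) :
    ∀ (k : Nat) (i : Int), 20 - i = (k : Int) → 1 ≤ i → i ≤ M →
      computeLoopA b az (PySem.List.pyRange i 20 1) =
        if M ≤ 19 ∧ az * M ≤ b * 2 then some (az * M) else none := by
  intro k
  induction k with
  | zero =>
    intro i hk h1 hiM
    have hi : i = 20 := by omega
    subst hi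
    rw [PySem.List.pyRange_one_eq_nil (by omega), if_neg (by omega)]
    rfl
  | succ k ih =>
    intro i hk h1 hiM
    have hilt : i < 20 := by omega
    rw [PySem.List.pyRange_one_cons hilt]
    simp only [computeLoopA]
    by_cases hieq : i = M
    · subst hieq
      by_cases hub : az * i ≤ b * 2
      · rw [if_pos ⟨(hM i h1).mpr le_rfl, hub⟩, if_pos ⟨by omega, hub⟩]
      · rw [if_neg (fun hc => hub hc.2), if_neg (fun hc => hub hc.2)]
        apply computeLoopA_none
        intro m hm hc
        have hb := (PySem.List.mem_pyRange_one.mp hm).1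
        have hmono : az * i ≤ az * m := mul_le_mul_of_nonneg_left (by omega) (le_of_lt haz)
        exact hub (le_trans hmono hc.2)
    · have hlt : i < M := lt_of_le_of_ne hiM hieq
      rw [if_neg (fun hc => absurd ((hM i h1).mp hc.1) (by omega))]
      exact ih (i + 1) (by omega) (by omega) (by omega)

-- ===== VERDICT (by name: the statement is the Claim_ definition above) =====
theorem compute_valid_scale_target_py_spec : Claim_equal_compute_valid_scale_target_py := by
  intro b az _
  unfold Spec_compute_valid_scale_target_py compute_valid_scale_target_py compute_valid_scale_target_py_alt
  by_cases haz : az ≤ 0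
  · simp [haz]
  · have hazpos : 0 < az := by omega
    rw [if_neg haz, if_neg haz, PySem.Int.floordiv_eq_ediv_of_pos hazpos]
    set q := b / az with hq
    set M : Int := if q + 1 < 1 then 1 else q + 1 with hMdef
    have h1M : 1 ≤ M := by rw [hMdef]; split_ifs <;> omega
    have hdiv : ∀ m : Int, q < m ↔ b < m * az := fun m => Int.ediv_lt_iff_lt_mul hazpos
    have hM : ∀ m : Int, 1 ≤ m → (az * m > b ↔ M ≤ m) := by
      intro m hm
      constructor
      · intro h
        have hqm : q < m := (hdiv m).mpr (by linarith [h])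
        rw [hMdef]; split_ifs <;> omega
      · intro h
        have hqm : q < m := by
          rw [hMdef] at h; split_ifs at h <;> omega
        have := (hdiv m).mp hqm
        linarith
    have hrun := computeLoopA_run b az M hazpos hM 19 1 (by norm_num) le_rfl h1M
    rw [hrun]
    have hbM : b < az * M := (hM M h1M).mpr le_rfl
    by_cases hc : M ≤ 19 ∧ az * M ≤ b * 2
    · rw [if_pos hc, if_pos ⟨hc.1, hbM, hc.2⟩]
    · rw [if_neg hc, if_neg (fun h => hc ⟨h.1, h.2.2⟩)]
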